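-- pv_equiv track=rewrite | github.com/RegNLP/MultiPassage-RegIR | src/ltr/step4b_train_ltr.py | make_group
-- ===== SOURCE A (Python) =====
-- from typing import Dict, List, Tuple
--
-- def make_group(qids: List[str]) -> List[int]:
--     """LightGBM expects group sizes per query; requires qids contiguous."""
--     if not qids:
--         return []
--     group: List[int] = []
--     last = qids[0]
--     cnt = 0
--     for q in qids:
--         if q == last:
--             cnt += 1
--         else:
--             group.append(cnt)
--             last = q
--             cnt = 1
--     group.append(cnt)
--     return group
-- ===== SOURCE B (Python) =====
-- from typing import List
--
-- def make_group(qids: List[str]) -> List[int]: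
--     """LightGBM expects group sizes per query; requires qids contiguous."""
--     n = len(qids)
--     # boundary positions: 0, n, and every index where the query id changes
--     bounds = [i for i in range(n + 1)
--               if i == 0 or i == n or qids[i] != qids[i - 1]]
--     # group sizes are the gaps between consecutive boundaries
--     return [b - a for a, b in zip(bounds, bounds[1:])]
-- ===== Notes on version B (the rewrite author's own statement) =====
-- stated objective: alternative
-- what changed: Instead of a running last/cnt counter, B first collects the boundary index list (0, n, and every index where qids[i] != qids[i-1]) and then returns the differences of consecutive boundaries.
import Mathlib
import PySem

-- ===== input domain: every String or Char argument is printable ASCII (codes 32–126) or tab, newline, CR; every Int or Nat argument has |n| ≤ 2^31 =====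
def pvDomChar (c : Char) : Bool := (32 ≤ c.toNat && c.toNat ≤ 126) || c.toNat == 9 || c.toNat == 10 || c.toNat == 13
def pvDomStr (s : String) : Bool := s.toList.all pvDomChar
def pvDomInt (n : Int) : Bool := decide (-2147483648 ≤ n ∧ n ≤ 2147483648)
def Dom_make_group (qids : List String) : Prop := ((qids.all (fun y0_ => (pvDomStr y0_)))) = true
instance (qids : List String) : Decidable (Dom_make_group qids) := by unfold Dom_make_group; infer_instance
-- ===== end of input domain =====

-- B replaces A's running last/cnt counter by two staged passes: collect the boundary
-- indices (0, n, and every change point) and return differences of consecutive boundaries.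

-- ===== PORT A =====
-- A's for-loop over qids carrying (group, last, cnt), then a final append of cnt.
def runA (last : String) (cnt : Int) (group : List Int) : List String → List Int
  | [] => group ++ [cnt]
  | q :: rest =>
    if q == last then runA last (cnt + 1) group rest
    else runA q 1 (group ++ [cnt]) rest

def make_group (qids : List String) : List Int :=
  match qids with
  | [] => []
  | q :: _ => runA q 0 [] qids

-- ===== PORT B =====
-- Source B: bounds = [i for i in range(n+1) if i == 0 or i == n or qids[i] != qids[i-1]];
--       return [b - a for a, b in zip(bounds, bounds[1:])]
def make_group_alt (qids : List String) : List Int :=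
  let n : Int := qids.length
  let bounds : List Int := (PySem.List.pyRange 0 (n + 1) 1).filter
    (fun i => i == 0 || i == n ||
      !(PySem.List.pyGet? qids i == PySem.List.pyGet? qids (i - 1)))
  (bounds.zip (PySem.List.slice bounds (some 1) none)).map (fun p => p.2 - p.1)

-- ===== PRECONDITION & SPEC =====
def Spec_make_group (qids : List String) (out : List Int) : Prop := out = make_group_alt qids
instance (qids : List String) (out : List Int) : Decidable (Spec_make_group qids out) := by unfold Spec_make_group; infer_instance

-- ===== CLAIM (what is proved, stated in full; the proofs are below) =====
def Claim_equal_make_group : Prop := ∀ (qids : List String), Dom_make_group qids → Spec_make_group qids (make_group qids)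

-- ===== LEMMAS AND PROOFS =====

-- run-length form both ports are reduced to
def rle (qids : List String) : List Int :=
  match qids with
  | [] => []
  | q :: rest =>
    (1 + ((rest.takeWhile (· == q)).length : Int)) :: rle (rest.dropWhile (· == q))
termination_by qids.length
decreasing_by
  simp only [List.length_cons]
  exact Nat.lt_succ_of_le (List.length_dropWhile_le _ _)

-- Nat-side boundary list of port B
def boundsN (xs : List String) : List Nat :=
  (List.range (xs.length + 1)).filter
    (fun i => i == 0 || i == xs.length || !(xs[i]? == xs[i-1]?))

-- gaps between consecutive entries
def diffs (l : List Int) : List Int := (l.zip l.tail).map (fun p => p.2 - p.1)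

-- ---- A-side: make_group = rle ----
theorem runA_acc (xs : List String) : ∀ (l : String) (c : Int) (acc : List Int),
    runA l c acc xs = acc ++ runA l c [] xs := by
  induction xs with
  | nil => intro l c acc; simp [runA]
  | cons q rest ih =>
    intro l c acc
    by_cases h : (q == l) = true
    · simpa [runA, h] using ih l (c + 1) acc
    · simp [runA, h]
      rw [ih q 1 (acc ++ [c]), ih q 1 [c]]
      simp

theorem runA_rle (xs : List String) : ∀ (l : String) (c : Int),
    runA l c [] xs =
      (c + ((xs.takeWhile (· == l)).length : Int)) :: rle (xs.dropWhile (· == l)) := by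
  induction xs with
  | nil => intro l c; simp [runA, rle]
  | cons q rest ih =>
    intro l c
    by_cases h : (q == l) = true
    · simp [runA, h, List.takeWhile, List.dropWhile, ih l (c + 1)]
      ring
    · simp [runA, List.takeWhile, List.dropWhile, h]
      rw [runA_acc, ih q 1]
      simp [rle]

theorem make_group_eq_rle (xs : List String) : make_group xs = rle xs := by
  match xs with
  | [] => simp [make_group, rle]
  | q :: rest =>
    show runA q 0 [] (q :: rest) = _
    simp only [runA, beq_self_eq_true, if_true]
    rw [runA_rle]
    simp [rle, zero_add]

-- ---- diffs lemmas ----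
theorem diffs_map_add (m : Int) (l : List Int) : diffs (l.map (· + m)) = diffs l := by
  induction l with
  | nil => rfl
  | cons x t ih =>
    cases t with
    | nil => rfl
    | cons y s =>
      simp only [diffs, List.map, List.tail, List.zip] at *
      simp_all

theorem diffs_cons_cons (a b : Int) (s : List Int) :
    diffs (a :: b :: s) = (b - a) :: diffs (b :: s) := by simp [diffs]

-- ---- boundsN recursion ----
theorem boundsN_nil : boundsN [] = [0] := by decide

theorem boundsN_cons (q : String) (rest : List String) :
    boundsN (q :: rest) =
      0 :: (boundsN (rest.dropWhile (· == q))).map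
        (· + ((rest.takeWhile (· == q)).length + 1)) := by
  set k := (rest.takeWhile (· == q)).length with hk
  set ys := rest.dropWhile (· == q) with hys
  set L := ys.length with hL
  have hsplit : q :: rest = (q :: rest.takeWhile (· == q)) ++ ys := by
    rw [hys, List.cons_append, List.takeWhile_append_dropWhile]
  have hPlen : (q :: rest.takeWhile (· == q)).length = k + 1 := by simp [hk]
  have hlen : (q :: rest).length = (k + 1) + L := by
    rw [hsplit, List.length_append, hPlen, hL]
  have hP : ∀ x ∈ q :: rest.takeWhile (· == q), x = q := by
    intro x hx
    rcases List.mem_cons.mp hx with h | h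
    · exact h
    · exact eq_of_beq (List.mem_takeWhile_imp (p := fun x => x == q) h)
  have hgetP : ∀ i, i ≤ k → (q :: rest)[i]? = some q := by
    intro i hi
    rw [hsplit, List.getElem?_append_left (by omega)]
    rw [List.getElem?_eq_getElem (by omega)]
    exact congrArg some (hP _ (List.getElem_mem _))
  have hgetY : ∀ i, (q :: rest)[(k+1)+i]? = ys[i]? := by
    intro i
    rw [hsplit, List.getElem?_append_right (by omega), hPlen]
    congr 1
    omega
  set c : Nat → Bool := fun i => i == 0 || i == (k+1)+L || !((q :: rest)[i]? == (q :: rest)[i-1]?) with hc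
  have hbn : boundsN (q :: rest) = (List.range ((k+1)+(L+1))).filter c := by
    unfold boundsN
    rw [hlen]
    congr 1
  rw [hbn, List.range_add, List.filter_append]
  have h1 : (List.range (k+1)).filter c = [0] := by
    rw [List.range_succ_eq_map, List.filter_cons]
    have hc0 : c 0 = true := by simp [hc]
    rw [if_pos (by simp [hc0])]
    have hnil : ((List.range k).map Nat.succ).filter c = [] := by
      rw [List.filter_eq_nil_iff]
      intro a ha
      rcases List.mem_map.mp ha with ⟨j, hj, rfl⟩
      have hjk : j < k := List.mem_range.mp hj
      simp only [hc, Nat.succ_eq_add_one]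
      rw [hgetP (j+1) (by omega), show (j+1)-1 = j from rfl, hgetP j (by omega)]
      simp
      omega
    rw [hnil]
  have h2 : (((List.range (L+1)).map ((k+1) + ·)).filter c)
      = (boundsN ys).map (· + (k + 1)) := by
    rw [List.filter_map]
    have hcong : (List.range (L+1)).filter (c ∘ ((k+1) + ·))
        = (List.range (L+1)).filter (fun i => i == 0 || i == ys.length || !(ys[i]? == ys[i-1]?)) := by
      apply List.filter_congr
      intro j hj
      have hjL : j < L + 1 := List.mem_range.mp hj
      simp only [Function.comp]
      cases j with
      | zero =>
        have hrhs : ((0:Nat) == 0 || (0:Nat) == ys.length || !(ys[(0:Nat)]? == ys[(0:Nat)-1]?)) = true := by simp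
        rw [hrhs]
        show c ((k+1)+0) = true
        simp only [hc, Nat.add_zero]
        by_cases hL0 : L = 0
        · simp [hL0]
        · have hyslen : 0 < ys.length := by omega
          have hhead : ((ys[0]'hyslen) == q) = false := by
            have h0 := List.dropWhile_get_zero_not (p := fun x => x == q) rest (hys ▸ hyslen)
            simpa using h0
          have h01 : (q :: rest)[k+1]? = ys[0]? := by simpa using hgetY 0
          have h02 : (q :: rest)[k]? = some q := hgetP k (Nat.le_refl k)
          have hys0 : ys[0]? = some (ys[0]'hyslen) := List.getElem?_eq_getElem hyslen
          rw [show (k+1)-1 = k from rfl, h01, h02, hys0]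
          simp [hhead]
      | succ j' =>
        simp only [hc]
        have e1 : (q :: rest)[(k+1)+(j'+1)]? = ys[j'+1]? := hgetY (j'+1)
        have e2 : (q :: rest)[(k+1)+(j'+1)-1]? = ys[j']? := by
          rw [show (k+1)+(j'+1)-1 = (k+1)+j' from by omega]
          exact hgetY j'
        rw [e1, e2]
        have b1 : ((k+1)+(j'+1) == 0) = false := by simp
        have b2 : ((k+1)+(j'+1) == (k+1)+L) = (j'+1 == L) := by
          by_cases h : j' + 1 = L
          · simp [h]
          · simp [h]
        have b3 : ((j'+1 : Nat) == 0) = false := by simp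
        rw [b1, b2, b3, show (j'+1)-1 = j' from rfl]
    rw [hcong, ← boundsN]
    exact List.map_congr_left (fun a _ => by omega)
  rw [h1, h2]
  rfl

theorem boundsN_head (xs : List String) : ∃ t, boundsN xs = 0 :: t := by
  match xs with
  | [] => exact ⟨[], boundsN_nil⟩
  | q :: rest => exact ⟨_, boundsN_cons q rest⟩

-- ---- B-side: make_group_alt = diffs ∘ boundsN (cast to Int) ----
theorem alt_eq_diffs_boundsN (xs : List String) :
    make_group_alt xs = diffs ((boundsN xs).map (fun i : Nat => (i : Int))) := by
  unfold make_group_alt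
  simp only [PySem.List.slice_from_one]
  have hb : (PySem.List.pyRange 0 ((xs.length : Int) + 1) 1).filter
      (fun i => i == 0 || i == (xs.length : Int) ||
        !(PySem.List.pyGet? xs i == PySem.List.pyGet? xs (i - 1)))
      = (boundsN xs).map (fun i : Nat => (i : Int)) := by
    rw [PySem.List.pyRange_one]
    have hlen : (((xs.length : Int) + 1 - 0)).toNat = xs.length + 1 := by omega
    rw [hlen]
    have hmap : (List.range (xs.length + 1)).map (fun k : Nat => (0 : Int) + (k : Int))
        = (List.range (xs.length + 1)).map (fun i : Nat => (i : Int)) :=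
      List.map_congr_left (fun a _ => by omega)
    rw [hmap, List.filter_map]
    unfold boundsN
    congr 1
    apply List.filter_congr
    intro j hj
    have hjL : j < xs.length + 1 := List.mem_range.mp hj
    simp only [Function.comp]
    cases j with
    | zero => simp
    | succ j' =>
      have b1 : (((j'+1 : Nat) : Int) == (0:Int)) = false := by
        simp
        omega
      have b3 : ((j'+1 : Nat) == 0) = false := by simp
      have b2 : (((j'+1 : Nat) : Int) == (xs.length : Int)) = ((j'+1 : Nat) == xs.length) := by
        by_cases h : j' + 1 = xs.length
        · simp [h]
        · simp [h]
          omega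
      have e1 : PySem.List.pyGet? xs ((j'+1 : Nat) : Int) = xs[j'+1]? :=
        PySem.List.pyGet?_natCast xs (j'+1)
      have e2 : PySem.List.pyGet? xs (((j'+1 : Nat) : Int) - 1) = xs[j']? := by
        rw [show ((j'+1 : Nat) : Int) - 1 = (j' : Int) from by push_cast; ring]
        exact PySem.List.pyGet?_natCast xs j'
      rw [b1, b2, e1, e2, b3, show (j'+1)-1 = j' from rfl]
  rw [hb]
  rfl

-- ---- gaps between boundaries are the run lengths ----
theorem diffs_boundsN_aux : ∀ (n : Nat) (xs : List String), xs.length ≤ n →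
    diffs ((boundsN xs).map (fun i : Nat => (i : Int))) = rle xs := by
  intro n
  induction n with
  | zero =>
    intro xs h
    have : xs = [] := List.eq_nil_of_length_eq_zero (Nat.le_zero.mp h)
    subst this
    simp [boundsN_nil, diffs, rle]
  | succ n ih =>
    intro xs h
    match xs with
    | [] => simp [boundsN_nil, diffs, rle]
    | q :: rest =>
      have hlen : (rest.dropWhile (· == q)).length ≤ n := by
        have := List.length_dropWhile_le (· == q) rest
        simp at h; omega
      set ys := rest.dropWhile (· == q) with hys
      set k := (rest.takeWhile (· == q)).length with hk
      obtain ⟨t, ht⟩ := boundsN_head ys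
      rw [boundsN_cons, ht]
      have hmap : ((0 :: t).map (· + (k + 1))).map (fun i : Nat => (i : Int))
          = ((0 :: t).map (fun i : Nat => (i : Int))).map (· + ((k : Int) + 1)) := by
        simp only [List.map_map]
        congr 1
      rw [List.map_cons, hmap, List.map_cons, List.map_cons, diffs_cons_cons]
      rw [show ((((0:Nat) : Int) + ((k:Int)+1)) :: (t.map (fun i : Nat => (i : Int))).map (· + ((k:Int)+1)))
            = ((0 :: t).map (fun i : Nat => (i : Int))).map (· + ((k:Int)+1)) by simp]
      rw [diffs_map_add, ← ht, ih ys hlen]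
      simp [rle, ← hys, ← hk]
      ring

-- ===== VERDICT (by name: the statement is the Claim_ definition above) =====
theorem make_group_spec : Claim_equal_make_group := by
  intro qids _
  unfold Spec_make_group
  rw [make_group_eq_rle, alt_eq_diffs_boundsN, diffs_boundsN_aux (qids.length) qids (le_refl _)]
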